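-- pv_equiv track=rewrite | github.com/Henrique-de-la-Pena/projetoEP2 | funcoes.py | calcula_pontos_quina
-- ===== SOURCE A (Python) =====
-- def calcula_pontos_quina(dados_rolados):
--     dados = {}
--     for i in range(len(dados_rolados)):
--         if dados_rolados[i] not in dados:
--             dados[dados_rolados[i]] = 1
--         else:
--             dados[dados_rolados[i]] += 1
--     for qtd in dados.values():
--         if qtd >= 5:
--             return 50
--     return 0
-- ===== SOURCE B (Python) =====
-- def calcula_pontos_quina(dados_rolados):
--     ordenados = sorted(dados_rolados)
--     n = len(ordenados)
--     i = 0
--     while i < n: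
--         j = i + 1
--         while j < n and ordenados[j] == ordenados[i]:
--             j += 1
--         if j - i >= 5:
--             return 50
--         i = j
--     return 0
-- ===== Notes on version B (the rewrite author's own statement) =====
-- stated objective: alternative
-- what changed: Replaces the frequency dictionary plus values scan with sorting a copy and scanning runs of equal adjacent values, returning 50 as soon as a run of length 5 is found.
import Mathlib
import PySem

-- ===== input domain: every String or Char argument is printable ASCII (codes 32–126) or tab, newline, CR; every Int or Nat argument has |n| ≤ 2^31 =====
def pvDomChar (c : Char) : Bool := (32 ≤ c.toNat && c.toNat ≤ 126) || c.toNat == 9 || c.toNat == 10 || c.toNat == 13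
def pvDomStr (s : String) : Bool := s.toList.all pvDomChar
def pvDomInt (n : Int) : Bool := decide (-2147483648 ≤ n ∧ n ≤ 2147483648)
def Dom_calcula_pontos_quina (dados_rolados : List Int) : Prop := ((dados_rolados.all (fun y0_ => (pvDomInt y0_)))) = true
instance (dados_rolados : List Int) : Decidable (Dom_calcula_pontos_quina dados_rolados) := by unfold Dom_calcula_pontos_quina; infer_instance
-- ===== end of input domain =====

-- B replaces A's frequency-dict tabulation by sorting a copy and scanning runs of equal
-- adjacent values (alternative algorithm; not claimed faster).


-- ===== PORT A =====
-- for i in range(len(dados_rolados)): count dados_rolados[i] in a dict; then scan values for one ≥ 5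
def calcula_pontos_quina (dados_rolados : List Int) : Int :=
  let dados : PySem.Dict Int Int :=
    (PySem.List.pyRange 0 (dados_rolados.length : Int) 1).foldl
      (fun d i =>
        let x := PySem.List.pyGetD dados_rolados i 0
        if d.contains x = false then d.insert x 1 else d.insert x (d.getD x 0 + 1))
      PySem.Dict.empty
  if dados.values.any (fun qtd => decide (5 ≤ qtd)) then 50 else 0

-- ===== PORT B =====
-- the outer while loop over the sorted data, acting on the suffix that starts at index i:
-- j - i (the leading run) is 1 + the takeWhile length over the tail; i = j drops that run
def pvRunScan : List Int → Int
  | [] => 0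
  | v :: rest =>
    -- bloco, the length of the leading run (the inner while loop)
    if 5 ≤ 1 + (rest.takeWhile (fun y => y == v)).length then 50
    else pvRunScan (rest.dropWhile (fun y => y == v))
termination_by l => l.length
decreasing_by
  simpa using Nat.lt_succ_of_le ((List.dropWhile_sublist _).length_le)

def calcula_pontos_quina_alt (dados_rolados : List Int) : Int :=
  pvRunScan (PySem.List.sorted dados_rolados (fun x => x) false)

-- ===== PRECONDITION & SPEC =====
def Spec_calcula_pontos_quina (dados_rolados : List Int) (out : Int) : Prop := out = calcula_pontos_quina_alt dados_rolados
instance (dados_rolados : List Int) (out : Int) : Decidable (Spec_calcula_pontos_quina dados_rolados out) := by unfold Spec_calcula_pontos_quina; infer_instance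

-- ===== CLAIM (what is proved, stated in full; the proofs are below) =====
def Claim_equal_calcula_pontos_quina : Prop := ∀ (dados_rolados : List Int), Dom_calcula_pontos_quina dados_rolados → Spec_calcula_pontos_quina dados_rolados (calcula_pontos_quina dados_rolados)

-- ===== LEMMAS AND PROOFS =====

-- A returns 50 exactly when some value occurs at least 5 times.
theorem calcA_char (l : List Int) :
    calcula_pontos_quina l = if ∃ x ∈ l, 5 ≤ l.count x then 50 else 0 := by
  have hA : calcula_pontos_quina l =
      (if ((PySem.List.pyRange 0 (l.length : Int) 1).foldl
            (fun (d : PySem.Dict Int Int) i =>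
              if d.contains (PySem.List.pyGetD l i 0) = false
              then d.insert (PySem.List.pyGetD l i 0) 1
              else d.insert (PySem.List.pyGetD l i 0)
                    (d.getD (PySem.List.pyGetD l i 0) 0 + 1))
            PySem.Dict.empty).values.any (fun qtd => decide (5 ≤ qtd)) then 50 else 0) := rfl
  rw [hA, PySem.List.foldl_pyRange_zero_pyGetD' l 0
      (f := fun (d : PySem.Dict Int Int) x =>
        if d.contains x = false then d.insert x 1 else d.insert x (d.getD x 0 + 1))]
  rw [PySem.List.foldl_congr_mem
      (l := l) (init := (PySem.Dict.empty : PySem.Dict Int Int))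
      (f := fun (d : PySem.Dict Int Int) x =>
        if d.contains x = false then d.insert x 1 else d.insert x (d.getD x 0 + 1))
      (g := fun (d : PySem.Dict Int Int) x => d.insert x (d.getD x 0 + 1))
      (by
        intro d x _
        by_cases h : d.contains x = true
        · simp [h]
        · have h' : d.contains x = false := by simpa using h
          simp [h', PySem.Dict.getD_of_not_contains])]
  rw [PySem.Dict.foldl_insert_getD_add_one_eq_counter]
  have hv : (PySem.Dict.counter l).values
      = (PySem.Set.ofList l).map (fun k => (l.count k : Int)) := by
    show ((PySem.Dict.counter l).items).map (·.2) = _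
    rw [PySem.Dict.items_counter]
    simp
  rw [hv]
  have hb : ((PySem.Set.ofList l).map (fun k => (l.count k : Int))).any
      (fun qtd => decide (5 ≤ qtd)) = true ↔ ∃ x ∈ l, 5 ≤ l.count x := by
    rw [List.any_map]
    simp only [Function.comp, List.any_eq_true]
    constructor
    · rintro ⟨x, hx, h⟩
      refine ⟨x, (PySem.Set.mem_ofList _ _).1 hx, ?_⟩
      simp at h
      exact_mod_cast h
    · rintro ⟨x, hx, h⟩
      refine ⟨x, (PySem.Set.mem_ofList _ _).2 hx, ?_⟩
      simp
      exact_mod_cast h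
  by_cases hP : ∃ x ∈ l, 5 ≤ l.count x
  · rw [if_pos (hb.2 hP), if_pos hP]
  · rw [if_neg (fun h => hP (hb.1 h)), if_neg hP]

-- On a sorted list, the run scan returns 50 exactly when some value occurs at least 5 times.
theorem pvRunScan_char (l : List Int) (hs : l.Pairwise (· ≤ ·)) :
    pvRunScan l = if ∃ x ∈ l, 5 ≤ l.count x then 50 else 0 := by
  induction l using pvRunScan.induct with
  | case1 => simp [pvRunScan]
  | case2 v rest h5 => -- run reaches 5
    have hcnt : 5 ≤ (v :: rest).count v := by
      have hle : (rest.takeWhile (fun y => y == v)).length ≤ rest.count v := by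
        have htv : ∀ y ∈ rest.takeWhile (fun y => y == v), y = v := by
          intro y hy
          simpa using List.mem_takeWhile_imp hy
        calc (rest.takeWhile (fun y => y == v)).length
            = (rest.takeWhile (fun y => y == v)).count v :=
              (List.count_eq_length.2 (fun b hb => (htv b hb).symm)).symm
          _ ≤ rest.count v := (List.takeWhile_sublist _).count_le _
      simp only [List.count_cons_self]
      omega
    rw [pvRunScan, if_pos h5, if_pos ⟨v, List.mem_cons_self, hcnt⟩]
  | case3 v rest h5 ih =>
    have htv : ∀ y ∈ rest.takeWhile (fun y => y == v), y = v := by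
      intro y hy
      simpa using List.mem_takeWhile_imp hy
    have hrest : rest.takeWhile (fun y => y == v) ++ rest.dropWhile (fun y => y == v) = rest :=
      List.takeWhile_append_dropWhile
    have hds : (rest.dropWhile (fun y => y == v)).Pairwise (· ≤ ·) :=
      (hs.of_cons).sublist (List.dropWhile_sublist _)
    -- v does not occur after the leading run
    have hvd : v ∉ rest.dropWhile (fun y => y == v) := by
      intro hv
      cases hdm : rest.dropWhile (fun y => y == v) with
      | nil => rw [hdm] at hv; simp at hv
      | cons w d' =>
        rw [hdm] at hv hds
        have hhead := List.head?_dropWhile_not (fun y => y == v) rest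
        rw [hdm] at hhead
        simp at hhead
        have hwmem : w ∈ rest := (List.dropWhile_sublist _).subset (by rw [hdm]; exact List.mem_cons_self)
        have hvw : v ≤ w := (List.pairwise_cons.1 hs).1 w hwmem
        have hwv : w ≤ v := by
          rcases List.mem_cons.1 hv with rfl | hv'
          · exact le_refl _
          · exact (List.pairwise_cons.1 hds).1 v hv'
        exact hhead (le_antisymm hwv hvw)
    have hcv : (v :: rest).count v = 1 + (rest.takeWhile (fun y => y == v)).length := by
      have h1 : (rest.takeWhile (fun y => y == v)).count v
          = (rest.takeWhile (fun y => y == v)).length :=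
        List.count_eq_length.2 (fun b hb => (htv b hb).symm)
      have h2 : (rest.dropWhile (fun y => y == v)).count v = 0 := List.count_eq_zero.2 hvd
      have hc := congrArg (List.count v) hrest
      rw [List.count_append, h1, h2] at hc
      rw [List.count_cons_self]
      omega
    have hcx : ∀ x, x ≠ v →
        (v :: rest).count x = (rest.dropWhile (fun y => y == v)).count x := by
      intro x hx
      have h1 : (rest.takeWhile (fun y => y == v)).count x = 0 :=
        List.count_eq_zero.2 (fun hmem => hx (htv x hmem))
      have h3 : (v :: rest).count x = rest.count x := by
        simp [Ne.symm hx]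
      have hc := congrArg (List.count x) hrest
      rw [List.count_append, h1] at hc
      rw [h3]
      omega
    rw [pvRunScan, if_neg h5, ih hds]
    congr 1
    apply propext
    constructor
    · rintro ⟨x, hx, hcnt⟩
      have hxv : x ≠ v := fun h => hvd (h ▸ hx)
      have hxl : x ∈ v :: rest :=
        List.mem_cons.2 (Or.inr ((List.dropWhile_sublist _).subset hx))
      exact ⟨x, hxl, by rw [hcx x hxv]; exact hcnt⟩
    · rintro ⟨x, hx, hcnt⟩
      by_cases hxv : x = v
      · exfalso; subst hxv; rw [hcv] at hcnt
        exact h5 (by simpa using hcnt)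
      · refine ⟨x, ?_, by rw [← hcx x hxv]; exact hcnt⟩
        rcases List.mem_cons.1 hx with rfl | hx'
        · exact absurd rfl hxv
        · rw [← hrest] at hx'
          rcases List.mem_append.1 hx' with h | h
          · exact absurd (htv x h) hxv
          · exact h

-- ===== VERDICT (by name: the statement is the Claim_ definition above) =====
theorem calcula_pontos_quina_spec : Claim_equal_calcula_pontos_quina := by
  intro l _
  show calcula_pontos_quina l = calcula_pontos_quina_alt l
  unfold calcula_pontos_quina_alt
  rw [calcA_char,
    pvRunScan_char _ (by simpa using PySem.List.sorted_pairwise l (fun x => x))]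
  have hperm : (PySem.List.sorted l (fun x => x) false).Perm l :=
    PySem.List.sorted_perm l (fun x => x) false
  congr 1
  apply propext
  constructor
  · rintro ⟨x, hx, hc⟩
    exact ⟨x, hperm.mem_iff.2 hx, by rw [hperm.count_eq]; exact hc⟩
  · rintro ⟨x, hx, hc⟩
    exact ⟨x, hperm.mem_iff.1 hx, by rw [← hperm.count_eq]; exact hc⟩
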